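-- pv_equiv track=rewrite | github.com/jiwwnn/algorithm | 프로그래머스/lv0/120843. 공 던지기/공 던지기.py | solution
-- ===== SOURCE A (Python) =====
-- def solution(numbers, k):
--     idx = 1
--     # k번째 던지는 사람 = k-1번째 사람이 토스한 상대
--     for i in range(k-1):
--         # 두 칸씩 이동하므로 for문 2번 돌리기
--         for j in range(2):
--             idx += 1
--             # len(numbers)보다 클 시 -len(numbers)하여 맨 앞 인덱스로 돌아가기
--             if idx > len(numbers):
--                 idx -= len(numbers)
--     return idx
-- ===== SOURCE B (Python) =====
-- def solution(numbers, k):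
--     # closed form: person 1 starts; thrower advances 2 seats per throw, modulo the circle
--     return (2 * (max(k, 1) - 1)) % len(numbers) + 1
-- ===== Notes on version B (the rewrite author's own statement) =====
-- stated objective: faster
-- what changed: Replaced the O(k) double loop with step-by-step wraparound by one closed-form modular expression (2*(max(k,1)-1)) % len(numbers) + 1.
-- outside the precondition, e.g. on solution([], 3): A returns 5, B raises ZeroDivisionError
import Mathlib
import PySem

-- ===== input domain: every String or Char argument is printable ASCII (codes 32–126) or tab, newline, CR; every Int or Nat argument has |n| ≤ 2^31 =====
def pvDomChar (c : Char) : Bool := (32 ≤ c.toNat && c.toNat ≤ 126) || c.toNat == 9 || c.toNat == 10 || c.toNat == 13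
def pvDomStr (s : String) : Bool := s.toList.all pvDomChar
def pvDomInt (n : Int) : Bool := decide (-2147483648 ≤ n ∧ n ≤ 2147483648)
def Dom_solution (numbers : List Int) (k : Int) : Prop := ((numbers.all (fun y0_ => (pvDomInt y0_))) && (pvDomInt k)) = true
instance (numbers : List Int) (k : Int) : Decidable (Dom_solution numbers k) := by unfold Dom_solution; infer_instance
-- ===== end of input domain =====

-- B replaces A's O(k) step-by-step double loop by the O(1) closed form (2*(max(k,1)-1)) % len(numbers) + 1.

-- ===== PORT A =====
def solution (numbers : List Int) (k : Int) : Int :=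
  (PySem.List.pyRange 0 (k - 1) 1).foldl
    (fun idx _ =>
      (PySem.List.pyRange 0 2 1).foldl
        (fun idx _ =>
          let idx := idx + 1
          if idx > (numbers.length : Int) then idx - (numbers.length : Int) else idx)
        idx)
    1

-- ===== PORT B =====
def solution_alt (numbers : List Int) (k : Int) : Int :=
  PySem.Int.mod (2 * (max k 1 - 1)) (numbers.length : Int) + 1

-- ===== PRECONDITION & SPEC =====
-- Pre_ excludes only the empty list: there B's '% len(numbers)' raises ZeroDivisionError,
-- while A returns the meaningless 2*k-1 (its wraparound subtracts 0 forever).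
def Pre_solution (numbers : List Int) (k : Int) : Prop := numbers ≠ []
instance (numbers : List Int) (k : Int) : Decidable (Pre_solution numbers k) := by unfold Pre_solution; infer_instance
def pvWitness_solution : List Int × Int := ([1, 2, 3, 4], 2)
def Spec_solution (numbers : List Int) (k : Int) (out : Int) : Prop := out = solution_alt numbers k
instance (numbers : List Int) (k : Int) (out : Int) : Decidable (Spec_solution numbers k out) := by unfold Spec_solution; infer_instance

-- ===== CLAIM (what is proved, stated in full; the proofs are below) =====
def Claim_equal_solution : Prop := ∀ (numbers : List Int) (k : Int), Dom_solution numbers k → Pre_solution numbers k → Spec_solution numbers k (solution numbers k)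

-- ===== LEMMAS AND PROOFS =====

-- one hop of A's inner loop
def pvStep (n : Int) (idx : Int) : Int :=
  if idx + 1 > n then idx + 1 - n else idx + 1

theorem foldl_const_iterate {α β : Type} (F : β → β) (l : List α) (init : β) :
    l.foldl (fun s _ => F s) init = F^[l.length] init := by
  induction l generalizing init with
  | nil => rfl
  | cons a t ih => simp [List.foldl, ih, Function.iterate_succ_apply]

-- two hops land on the next even residue
theorem pvStep2 (n r : Int) (hn : 0 < n) (hr0 : 0 ≤ r) (hrn : r < n) :
    pvStep n (pvStep n (r + 1)) = (r + 2) % n + 1 := by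
  unfold pvStep
  rcases lt_trichotomy (r + 2) n with h | h | h
  · rw [Int.emod_eq_of_lt (by omega) h]
    split_ifs <;> omega
  · rw [h, Int.emod_self]
    split_ifs <;> omega
  · have h2 : (r + 2) % n = 1 % n := by
      have h3 : r + 2 = 1 + n * 1 := by omega
      rw [h3, Int.add_mul_emod_self_left]
    rw [h2]
    by_cases h1 : n = 1
    · subst h1
      split_ifs <;> omega
    · rw [Int.emod_eq_of_lt (by omega) (by omega)]
      split_ifs <;> omega

-- m outer iterations from seat 1
theorem pvIter (n : Int) (hn : 0 < n) (m : Nat) :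
    (fun idx => pvStep n (pvStep n idx))^[m] 1 = (2 * (m : Int)) % n + 1 := by
  induction m with
  | zero => simp
  | succ m ih =>
    rw [Function.iterate_succ_apply', ih]
    set r := (2 * (m : Int)) % n with hr
    have hr0 : 0 ≤ r := Int.emod_nonneg _ (by omega)
    have hrn : r < n := Int.emod_lt_of_pos _ hn
    have hs := pvStep2 n r hn hr0 hrn
    have hq : 2 * (((m : Nat) + 1 : Nat) : Int) = (r + 2) + n * (2 * (m : Int) / n) := by
      have := Int.mul_ediv_add_emod (2 * (m : Int)) n
      push_cast
      omega
    simp only [hs, hq, Int.add_mul_emod_self_left]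

-- ===== VERDICT (by name: the statement is the Claim_ definition above) =====
theorem solution_spec : Claim_equal_solution := by
  intro numbers k _ hpre
  unfold Spec_solution solution solution_alt
  have hn : 0 < (numbers.length : Int) := by
    have : numbers.length ≠ 0 := by
      simpa [List.length_eq_zero_iff] using hpre
    omega
  have hinner : ∀ idx : Int,
      (PySem.List.pyRange 0 2 1).foldl
        (fun idx _ =>
          let idx := idx + 1
          if idx > (numbers.length : Int) then idx - (numbers.length : Int) else idx)
        idx = pvStep (numbers.length : Int) (pvStep (numbers.length : Int) idx) := by
    intro idx
    have h2 : PySem.List.pyRange 0 2 1 = [0, 1] := by decide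
    rw [h2]
    simp [List.foldl, pvStep]
  calc (PySem.List.pyRange 0 (k - 1) 1).foldl
        (fun idx _ =>
          (PySem.List.pyRange 0 2 1).foldl
            (fun idx _ =>
              let idx := idx + 1
              if idx > (numbers.length : Int) then idx - (numbers.length : Int) else idx)
            idx)
        1
      = (PySem.List.pyRange 0 (k - 1) 1).foldl
          (fun idx _ => pvStep (numbers.length : Int) (pvStep (numbers.length : Int) idx)) 1 := by
        simp only [hinner]
    _ = (fun idx => pvStep (numbers.length : Int) (pvStep (numbers.length : Int) idx))^[(PySem.List.pyRange 0 (k - 1) 1).length] 1 :=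
        foldl_const_iterate _ _ _
    _ = (2 * (((k - 1 - 0).toNat : Nat) : Int)) % (numbers.length : Int) + 1 := by
        rw [PySem.List.length_pyRange_one, pvIter _ hn]
    _ = PySem.Int.mod (2 * (max k 1 - 1)) (numbers.length : Int) + 1 := by
        rw [PySem.Int.mod_eq_emod_of_pos hn]
        have : (((k - 1 - 0).toNat : Nat) : Int) = max k 1 - 1 := by omega
        rw [this]
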